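-- pv_equiv track=rewrite | github.com/YurijMelnikov/Python_learning | Seminars/03/task_01/task_01.py | unique_count
-- ===== SOURCE A (Python) =====
-- def unique_count (random_list:list) -> int:
--     i = 0
--     unique_counter = len(random_list)
--     while i < len(random_list) - 1:
--         j = i + 1
--         while j < len(random_list):
--             if random_list[j] != None or random_list[j] != None:
--                 if (random_list[j] == random_list[i]):
--                     random_list[j] = None
--                     unique_counter-=1
--             j+=1
--         i+=1
--     print (random_list)
--     return unique_counter
-- ===== SOURCE B (Python) =====
-- def unique_count(random_list: list) -> int:
--     seen = set()
--     count = len(random_list)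
--     for idx, v in enumerate(random_list):
--         if v in seen:
--             random_list[idx] = None
--             count -= 1
--         else:
--             seen.add(v)
--     print(random_list)
--     return count
-- ===== Notes on version B (the rewrite author's own statement) =====
-- stated objective: faster
-- what changed: Replaces the quadratic nested index scan with one linear pass keeping a set of already-seen values: a duplicate is one whose value is already in the set, so it is nulled and the counter decremented in the same single sweep.
import Mathlib
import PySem

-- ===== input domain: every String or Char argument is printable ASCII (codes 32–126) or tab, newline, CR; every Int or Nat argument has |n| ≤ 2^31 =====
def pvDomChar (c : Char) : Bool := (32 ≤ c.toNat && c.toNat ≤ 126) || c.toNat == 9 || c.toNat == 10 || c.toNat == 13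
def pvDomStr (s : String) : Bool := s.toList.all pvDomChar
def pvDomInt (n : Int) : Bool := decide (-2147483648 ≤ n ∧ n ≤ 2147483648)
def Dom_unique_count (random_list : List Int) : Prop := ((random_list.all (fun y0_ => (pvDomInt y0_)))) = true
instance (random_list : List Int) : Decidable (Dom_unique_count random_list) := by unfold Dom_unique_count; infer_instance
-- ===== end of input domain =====

-- B replaces A's quadratic nested scan by one linear pass with a set of seen values (faster);
-- both Pythons null duplicates in place and print the list identically — the theorems here are about the return value only.

-- ===== PORT A =====
-- inner while loop: j runs over positions j..n-1, nulling current entries equal to entry i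
def ucInner (n i : Nat) (j : Nat) (st : List (Option Int) × Int) : List (Option Int) × Int :=
  if _h : j < n then
    let xj := st.1.getD j none
    let st' :=
      if xj ≠ none ∨ xj ≠ none then
        if xj = st.1.getD i none then (st.1.set j none, st.2 - 1) else st
      else st
    ucInner n i (j + 1) st'
  else st
termination_by n - j

-- outer while loop: i runs while i < n - 1
def ucOuter (n : Nat) (i : Nat) (st : List (Option Int) × Int) : List (Option Int) × Int :=
  if _h : i < n - 1 then ucOuter n (i + 1) (ucInner n i (i + 1) st) else st
termination_by n - 1 - i

def unique_count (random_list : List Int) : Int :=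
  (ucOuter random_list.length 0 (random_list.map some, (random_list.length : Int))).2

-- ===== PORT B =====
-- Source B's single for loop over the elements; Source B's in-place write random_list[idx] = None only
-- touches positions already visited, so the returned count depends only on (seen, count) tracked here.
def ucAltLoop (seen : PySem.Set Int) (count : Int) : List Int → Int
  | [] => count
  | v :: rest =>
    if seen.contains v then ucAltLoop seen (count - 1) rest
    else ucAltLoop (PySem.Set.add seen v) count rest

def unique_count_alt (random_list : List Int) : Int :=
  ucAltLoop PySem.Set.empty (random_list.length : Int) random_list

-- ===== PRECONDITION & SPEC =====
def Spec_unique_count (random_list : List Int) (out : Int) : Prop := out = unique_count_alt random_list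
instance (random_list : List Int) (out : Int) : Decidable (Spec_unique_count random_list out) := by unfold Spec_unique_count; infer_instance

-- ===== CLAIM (what is proved, stated in full; the proofs are below) =====
def Claim_equal_unique_count : Prop := ∀ (random_list : List Int), Dom_unique_count random_list → Spec_unique_count random_list (unique_count random_list)

-- ===== LEMMAS AND PROOFS =====

-- the value A's state holds at position k once outer iterations 0..i-1 are done
def markPos (orig : List Int) (i k : Nat) : Option Int :=
  if (orig.take (min i k)).contains (orig.getD k 0) then none else some (orig.getD k 0)

def markL (orig : List Int) (i : Nat) : List (Option Int) :=
  (List.range orig.length).map (markPos orig i)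

-- state midway through inner iteration i: positions < j already reflect step i
def markMix (orig : List Int) (i j : Nat) : List (Option Int) :=
  (List.range orig.length).map (fun k => if k < j then markPos orig (i + 1) k else markPos orig i k)

-- number of positions k whose value occurs among the first min i k entries
def dupI (orig : List Int) (i : Nat) : Int :=
  ((List.range orig.length).countP
    (fun k => (orig.take (min i k)).contains (orig.getD k 0)) : Int)

-- number of positions ≥ j whose mark changes from step i to step i+1
def flips (orig : List Int) (i j : Nat) : Int :=
  ((List.range orig.length).countP
    (fun k => decide (j ≤ k) && (markPos orig i k != markPos orig (i + 1) k)) : Int)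

-- duplicates counted by B's pass, relative to an initial seen-set
def cntDup (seen : PySem.Set Int) : List Int → Int
  | [] => 0
  | v :: rest => (if seen.contains v then 1 else 0) + cntDup (PySem.Set.add seen v) rest

theorem ucAltLoop_eq (l : List Int) : ∀ (seen : PySem.Set Int) (c : Int),
    ucAltLoop seen c l = c - cntDup seen l := by
  induction l with
  | nil => intro seen c; simp [ucAltLoop, cntDup]
  | cons v rest ih =>
    intro seen c
    by_cases h : v ∈ seen <;>
      simp [ucAltLoop, cntDup, h, ih, PySem.Set.add, PySem.Set.contains] <;> ring

theorem contains_add (s : PySem.Set Int) (v x : Int) :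
    (PySem.Set.add s v).contains x = (s.contains x || x == v) := by
  simp only [PySem.Set.add, PySem.Set.contains, List.contains_append]
  by_cases h : v ∈ s <;> by_cases hx : x = v <;> simp [h, hx]

theorem cntDup_eq (l : List Int) : ∀ seen : PySem.Set Int,
    cntDup seen l = ((List.range l.length).countP
      (fun k => seen.contains (l.getD k 0) || (l.take k).contains (l.getD k 0)) : Int) := by
  induction l with
  | nil => intro seen; simp [cntDup]
  | cons v rest ih =>
    intro seen
    rw [cntDup, ih (PySem.Set.add seen v)]
    simp only [List.length_cons, List.range_succ_eq_map, List.countP_cons, List.countP_map]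
    have : ∀ k, ((fun k => (PySem.Set.add seen v).contains (rest.getD k 0) ||
          (rest.take k).contains (rest.getD k 0)) k) =
        ((fun k => seen.contains ((v :: rest).getD k 0) ||
          ((v :: rest).take k).contains ((v :: rest).getD k 0)) ∘ Nat.succ) k := by
      intro k
      simp [contains_add, List.take_succ_cons, Function.comp]
      by_cases h1 : seen.contains (rest.getD k 0) <;>
        by_cases h2 : rest.getD k 0 = v <;>
        by_cases h3 : (rest.take k).contains (rest.getD k 0) <;> simp_all <;> tauto
    rw [show ((fun k => (PySem.Set.add seen v).contains (rest.getD k 0) ||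
          (rest.take k).contains (rest.getD k 0)) : Nat → Bool) =
        ((fun k => seen.contains ((v :: rest).getD k 0) ||
          ((v :: rest).take k).contains ((v :: rest).getD k 0)) ∘ Nat.succ) from funext this]
    by_cases h : v ∈ seen <;> simp [PySem.Set.contains, h] <;> push_cast <;> ring

theorem getD_markMix (orig : List Int) (i j k : Nat) :
    (markMix orig i j).getD k none =
      if k < orig.length then (if k < j then markPos orig (i + 1) k else markPos orig i k)
      else none := by
  by_cases h : k < orig.length <;>
    simp [markMix, List.getD, List.getElem?_map, List.getElem?_range, h]

theorem markPos_agree (orig : List Int) (i k : Nat) (hk : k ≤ i) :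
    markPos orig (i + 1) k = markPos orig i k := by
  unfold markPos
  rw [show min (i + 1) k = k by omega, show min i k = k by omega]

theorem markMix_start (orig : List Int) (i : Nat) : markMix orig i (i + 1) = markL orig i := by
  unfold markMix markL
  apply List.map_congr_left
  intro k _
  by_cases h : k < i + 1
  · simp [h, markPos_agree orig i k (by omega)]
  · simp [h]

theorem markMix_end (orig : List Int) (i j : Nat) (hj : orig.length ≤ j) :
    markMix orig i j = markL orig (i + 1) := by
  unfold markMix markL
  apply List.map_congr_left
  intro k hk
  rw [List.mem_range] at hk
  simp [show k < j by omega]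

theorem markL_zero (orig : List Int) : markL orig 0 = orig.map some := by
  apply List.ext_getElem
  · simp [markL]
  · intro k h1 h2
    have hk : k < orig.length := by simpa [markL] using h1
    simp [markL, markPos, List.getD_eq_getElem?_getD, List.getElem?_eq_getElem hk]

theorem markStep (orig : List Int) (i j : Nat) (hij : i < j) (hj : j < orig.length) :
    markPos orig (i + 1) j =
      if markPos orig i j ≠ none ∧ markPos orig i j = markPos orig i i then none
      else markPos orig i j := by
  have hi : i < orig.length := by omega
  have htake : ∀ x : Int, (orig.take (i + 1)).contains x =
      ((orig.take i).contains x || x == orig.getD i 0) := by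
    intro x
    have hmem : x ∈ orig.take (i + 1) ↔ x ∈ orig.take i ∨ x = orig[i] := by
      rw [List.take_add_one, List.getElem?_eq_getElem hi, List.mem_append]
      simp only [Option.toList_some, List.mem_singleton]
    have hg : orig.getD i 0 = orig[i] := by
      simp [List.getD_eq_getElem?_getD, List.getElem?_eq_getElem hi]
    rw [hg]
    by_cases hx : x = orig[i]
    · subst hx
      have hx2 : orig[i] ∈ orig.take (i + 1) := hmem.mpr (Or.inr rfl)
      simp [hx2]
    · have hx2 : (x ∈ orig.take (i + 1)) ↔ x ∈ orig.take i := by simp [hmem, hx]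
      simp [hx2, hx]
  unfold markPos
  rw [show min i j = i by omega, show min (i + 1) j = i + 1 by omega,
    show min i i = i by omega, htake]
  by_cases h1 : (orig.take i).contains (orig.getD j 0) <;>
    by_cases h2 : (orig.take i).contains (orig.getD i 0) <;>
    by_cases h3 : orig.getD j 0 = orig.getD i 0 <;>
    simp_all

theorem countP_range_guard (q : Nat → Bool) (n j : Nat) (hj : j < n) :
    (List.range n).countP (fun k => decide (j ≤ k) && q k) =
      (if q j then 1 else 0) +
        (List.range n).countP (fun k => decide (j + 1 ≤ k) && q k) := by
  induction n with
  | zero => omega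
  | succ n ih =>
    rw [List.range_succ, List.countP_append, List.countP_append]
    by_cases h : j < n
    · rw [ih h]
      have e1 : (decide (j ≤ n) && q n) = q n := by simp [show j ≤ n by omega]
      have e2 : (decide (j + 1 ≤ n) && q n) = q n := by simp [show j + 1 ≤ n by omega]
      simp only [List.countP_cons, List.countP_nil, e1, e2]
      by_cases hq : q n <;> simp only [hq, if_true, if_false] <;> omega
    · have hjn : j = n := by omega
      subst hjn
      have z1 : (List.range j).countP (fun k => decide (j ≤ k) && q k) = 0 := by
        rw [List.countP_eq_zero]
        intro k hk
        rw [List.mem_range] at hk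
        simp; omega
      have z2 : (List.range j).countP (fun k => decide (j + 1 ≤ k) && q k) = 0 := by
        rw [List.countP_eq_zero]
        intro k hk
        rw [List.mem_range] at hk
        simp; omega
      rw [z1, z2]
      simp

theorem flips_end (orig : List Int) (i j : Nat) (hj : orig.length ≤ j) :
    flips orig i j = 0 := by
  unfold flips
  norm_num
  intro k hk hjk
  omega

theorem flips_step (orig : List Int) (i j : Nat) (hij : i < j) (hj : j < orig.length) :
    flips orig i j =
      (if markPos orig i j ≠ none ∧ markPos orig i j = markPos orig i i then 1 else 0) +
        flips orig i (j + 1) := by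
  unfold flips
  rw [countP_range_guard _ _ _ hj]
  have : (markPos orig i j != markPos orig (i + 1) j) =
      decide (markPos orig i j ≠ none ∧ markPos orig i j = markPos orig i i) := by
    rw [markStep orig i j hij hj]
    by_cases h : markPos orig i j ≠ none ∧ markPos orig i j = markPos orig i i
    · rw [if_pos h, h.2]
      have hne : markPos orig i i ≠ none := h.2 ▸ h.1
      simp [bne_iff_ne, hne, h]
    · rw [if_neg h]
      simp [h]
  rw [this]
  by_cases h : markPos orig i j ≠ none ∧ markPos orig i j = markPos orig i i <;>
    simp [h] <;> push_cast <;> ring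

theorem set_markMix (orig : List Int) (i j : Nat) (hj : j < orig.length) :
    (markMix orig i j).set j (markPos orig (i + 1) j) = markMix orig i (j + 1) := by
  apply List.ext_getElem
  · simp [markMix]
  · intro k h1 h2
    simp only [markMix, List.length_map, List.length_range] at h1 h2
    rw [List.getElem_set]
    simp only [markMix, List.getElem_map, List.getElem_range]
    by_cases hkj : j = k
    · subst hkj; simp
    · have : k < j ↔ k < j + 1 := by omega
      simp [hkj, this]

theorem inner_spec (orig : List Int) (i : Nat) : ∀ (m j : Nat) (c : Int),
    orig.length - j = m → i < j →
    ucInner orig.length i j (markMix orig i j, c) = (markL orig (i + 1), c - flips orig i j) := by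
  intro m
  induction m with
  | zero =>
    intro j c hm hij
    have hj : orig.length ≤ j := by omega
    rw [ucInner]
    simp [show ¬ j < orig.length by omega, markMix_end orig i j hj, flips_end orig i j hj]
  | succ m ih =>
    intro j c hm hij
    have hj : j < orig.length := by omega
    rw [ucInner]
    simp only [dif_pos hj]
    have hgj : (markMix orig i j).getD j none = markPos orig i j := by
      rw [getD_markMix]; simp [hj]
    have hgi : (markMix orig i j).getD i none = markPos orig i i := by
      rw [getD_markMix]
      simp [show i < orig.length by omega, show i < j from hij]
      exact markPos_agree orig i i (le_refl i)
    by_cases hb : markPos orig i j ≠ none ∧ markPos orig i j = markPos orig i i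
    · have hcond : markPos orig i j ≠ none ∨ markPos orig i j ≠ none := Or.inl hb.1
      rw [hgj, hgi, if_pos hcond, if_pos hb.2]
      have hset : (markMix orig i j).set j none = markMix orig i (j + 1) := by
        rw [← set_markMix orig i j hj, markStep orig i j hij hj, if_pos hb]
      rw [hset, ih (j + 1) (c - 1) (by omega) (by omega), flips_step orig i j hij hj,
        if_pos hb]
      rw [show c - 1 - flips orig i (j + 1) = c - (1 + flips orig i (j + 1)) by ring]
    · have hmix : markMix orig i j = markMix orig i (j + 1) := by
        rw [← set_markMix orig i j hj, markStep orig i j hij hj, if_neg hb]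
        apply List.ext_getElem
        · simp
        · intro k h1 h2
          rw [List.getElem_set]
          by_cases hkj : j = k
          · subst hkj
            simp only [if_pos rfl]
            rw [getD_markMix] at hgj
            simp [hj] at hgj
            simp [markMix, hgj]
          · simp [hkj]
      rw [hgj, hgi]
      rcases Classical.em (markPos orig i j = markPos orig i i) with he | he
      · by_cases hn : markPos orig i j = none
        · rw [if_neg (by simp [hn])]
          rw [hmix] at *
          rw [ih (j + 1) c (by omega) (by omega), flips_step orig i j hij hj, if_neg hb]
          simp
        · exact absurd ⟨hn, he⟩ hb
      · rw [if_neg he]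
        by_cases hn : markPos orig i j = none
        · rw [if_neg (by simp [hn])]
          rw [hmix] at *
          rw [ih (j + 1) c (by omega) (by omega), flips_step orig i j hij hj, if_neg hb]
          simp
        · rw [if_pos (Or.inl hn)]
          rw [hmix] at *
          rw [ih (j + 1) c (by omega) (by omega), flips_step orig i j hij hj, if_neg hb]
          simp
      
theorem countP_or_split {α : Type} (l : List α) (p q f : α → Bool)
    (h : ∀ x ∈ l, q x = (p x || f x) ∧ (p x && f x) = false) :
    l.countP q = l.countP p + l.countP f := by
  induction l with
  | nil => simp
  | cons a t ih =>
    simp only [List.countP_cons]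
    rw [ih (fun x hx => h x (List.mem_cons_of_mem a hx))]
    obtain ⟨h1, h2⟩ := h a (List.mem_cons_self)
    cases hp : p a <;> cases hf : f a <;> simp [hp, hf] at h1 h2 ⊢ <;> simp [h1] <;> omega

theorem dupI_step (orig : List Int) (i : Nat) :
    dupI orig (i + 1) = dupI orig i + flips orig i (i + 1) := by
  unfold dupI flips
  rw [countP_or_split (List.range orig.length)
      (fun k => (orig.take (min i k)).contains (orig.getD k 0))
      (fun k => (orig.take (min (i + 1) k)).contains (orig.getD k 0))
      (fun k => decide (i + 1 ≤ k) && (markPos orig i k != markPos orig (i + 1) k)) ?_]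
  · push_cast; ring
  · intro k hk
    rw [List.mem_range] at hk
    by_cases hki : k ≤ i
    · simp only [show min i k = k by omega, show min (i + 1) k = k by omega]
      simp [show ¬ (i + 1 ≤ k) by omega]
    · have e1 : min i k = i := by omega
      have e2 : min (i + 1) k = i + 1 := by omega
      simp only [e1, e2]
      have hmono : orig.getD k 0 ∈ orig.take i → orig.getD k 0 ∈ orig.take (i + 1) :=
        fun hy => List.take_subset_take_left orig (by omega) hy
      simp only [markPos, e1, e2]
      by_cases hp : orig.getD k 0 ∈ orig.take i <;>
        by_cases hq : orig.getD k 0 ∈ orig.take (i + 1) <;>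
        [skip; skip; skip; skip] <;>
        simp only [List.getD_eq_getElem?_getD] at hp hq
      · simp [hp, hq, show (i + 1 ≤ k) by omega]
      · exact absurd (hmono (by simpa [List.getD_eq_getElem?_getD] using hp)) hq
      · simp [hp, hq, show (i + 1 ≤ k) by omega]
      · simp [hp, hq, show (i + 1 ≤ k) by omega]

theorem outer_spec (orig : List Int) : ∀ (m i : Nat) (c : Int),
    orig.length - 1 - i = m →
    (ucOuter orig.length i (markL orig i, c)).2 = c - (dupI orig (max i (orig.length - 1)) - dupI orig i) := by
  intro m
  induction m with
  | zero =>
    intro i c hm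
    rw [ucOuter]
    simp [show ¬ i < orig.length - 1 by omega, show max i (orig.length - 1) = i by omega]
  | succ m ih =>
    intro i c hm
    have hi : i < orig.length - 1 := by omega
    rw [ucOuter]
    simp only [dif_pos hi]
    rw [← markMix_start orig i, inner_spec orig i (orig.length - (i + 1)) (i + 1) c rfl (by omega)]
    rw [ih (i + 1) _ (by omega)]
    have h1 : max (i + 1) (orig.length - 1) = orig.length - 1 := by omega
    have h2 : max i (orig.length - 1) = orig.length - 1 := by omega
    rw [h1, h2, dupI_step]
    ring

theorem dupI_zero (orig : List Int) : dupI orig 0 = 0 := by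
  simp [dupI]

theorem cntDup_empty_eq_dupI (rl : List Int) :
    cntDup PySem.Set.empty rl = dupI rl (rl.length - 1) := by
  rw [cntDup_eq]
  unfold dupI
  congr 1
  apply List.countP_congr
  intro k hk
  rw [List.mem_range] at hk
  rw [show min (rl.length - 1) k = k by omega]
  simp [PySem.Set.empty, PySem.Set.contains]

theorem unique_count_spec : Claim_equal_unique_count := by
  intro rl _
  unfold Spec_unique_count
  rw [unique_count, unique_count_alt, ucAltLoop_eq, ← markL_zero,
    outer_spec rl (rl.length - 1 - 0) 0 _ rfl, dupI_zero, cntDup_empty_eq_dupI]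
  rw [show max 0 (rl.length - 1) = rl.length - 1 by omega]
  ring
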